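-- pv_equiv track=rewrite | github.com/unitaryfund/aquapointer | aquapointer/digital/qubo_utils.py | sparse_sigmaz_string
-- ===== SOURCE A (Python) =====
-- def sparse_sigmaz_string(length: int, pos: list[int]) -> str:
--     r""" Given a list positions and integer length, returns a string of the
--     given length consisting of a Z at positions from the list of positions
--     and I otherwise. This is interpreted as a sparse Pauli operator.
--
--     Args:
--         length: Integer indicating the length of the string.
--         pos: List of integers for the positions of Z.
--
--     Returns:
--         String consisting of I's and Z's.
--
--     """
--     sparse_sigmaz_str = ""
--     for i in range(length):
--         if i in pos:
--             sparse_sigmaz_str += "Z"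
--         else:
--             sparse_sigmaz_str += "I"
--     return sparse_sigmaz_str
-- ===== SOURCE B (Python) =====
-- def sparse_sigmaz_string(length: int, pos: list[int]) -> str:
--     chars = ["I"] * length
--     for p in pos:
--         if 0 <= p < length:
--             chars[p] = "Z"
--     return "".join(chars)
-- ===== Notes on version B (the rewrite author's own statement) =====
-- stated objective: faster
-- what changed: Instead of scanning every index of the result and testing list membership (quadratic), B preallocates a buffer of 'I's and scatters 'Z' into it at each in-range position, then joins once.
import Mathlib
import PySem

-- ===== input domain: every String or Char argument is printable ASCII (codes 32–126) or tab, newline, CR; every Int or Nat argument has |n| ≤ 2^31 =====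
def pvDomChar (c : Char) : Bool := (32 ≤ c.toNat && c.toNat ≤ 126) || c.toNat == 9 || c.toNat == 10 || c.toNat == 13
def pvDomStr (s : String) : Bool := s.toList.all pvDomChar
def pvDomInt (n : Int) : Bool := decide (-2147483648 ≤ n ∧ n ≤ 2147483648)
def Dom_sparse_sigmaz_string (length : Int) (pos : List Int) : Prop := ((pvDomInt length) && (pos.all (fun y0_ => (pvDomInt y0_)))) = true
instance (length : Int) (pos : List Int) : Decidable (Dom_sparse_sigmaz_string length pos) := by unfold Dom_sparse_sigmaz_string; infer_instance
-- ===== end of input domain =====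

-- B replaces A's per-index membership scan with a preallocated 'I' buffer into which 'Z' is scattered at each in-range position (measured faster).


-- ===== PORT A =====
-- Literal port of A: scan i in range(length), append "Z" if i in pos else "I".
def sparse_sigmaz_string (length : Int) (pos : List Int) : String :=
  (PySem.List.pyRange 0 length 1).foldl
    (fun s i => s ++ (if i ∈ pos then "Z" else "I")) ""

-- ===== PORT B =====
-- Port of B: preallocate ['I'] * length, scatter 'Z' at each in-range position, join.
def sparse_sigmaz_string_alt (length : Int) (pos : List Int) : String :=
  String.ofList (pos.foldl
    (fun cs p => if 0 ≤ p ∧ p < length then cs.set p.toNat 'Z' else cs)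
    (List.replicate length.toNat 'I'))

-- ===== PRECONDITION & SPEC =====
def Spec_sparse_sigmaz_string (length : Int) (pos : List Int) (out : String) : Prop := out = sparse_sigmaz_string_alt length pos
instance (length : Int) (pos : List Int) (out : String) : Decidable (Spec_sparse_sigmaz_string length pos out) := by unfold Spec_sparse_sigmaz_string; infer_instance

-- ===== CLAIM (what is proved, stated in full; the proofs are below) =====
def Claim_equal_sparse_sigmaz_string : Prop := ∀ (length : Int) (pos : List Int), Dom_sparse_sigmaz_string length pos → Spec_sparse_sigmaz_string length pos (sparse_sigmaz_string length pos)

-- ===== LEMMAS AND PROOFS =====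


lemma foldA {α : Type} (c : α → Prop) [DecidablePred c] :
    ∀ (l : List α) (s : String),
      l.foldl (fun s i => s ++ (if c i then "Z" else "I")) s
        = s ++ String.ofList (l.map (fun i => if c i then 'Z' else 'I')) := by
  intro l
  induction l with
  | nil => intro s; simp
  | cons i l ih =>
    intro s
    simp only [List.foldl_cons, ih, List.map_cons]
    have hz : ("Z" : String) = String.ofList ['Z'] := rfl
    have hi : ("I" : String) = String.ofList ['I'] := rfl
    by_cases h : c i
    · simp only [h, if_true, String.append_assoc]
      rw [hz, ← String.ofList_append, List.singleton_append]
    · simp only [h, if_false, String.append_assoc]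
      rw [hi, ← String.ofList_append, List.singleton_append]

lemma foldB_length (L : Int) :
    ∀ (l : List Int) (cs : List Char),
      (l.foldl (fun cs p => if 0 ≤ p ∧ p < L then cs.set p.toNat 'Z' else cs) cs).length
        = cs.length := by
  intro l
  induction l with
  | nil => intro cs; simp
  | cons p l ih =>
    intro cs
    simp only [List.foldl_cons, ih]
    split <;> simp

lemma foldB_getElem? (L : Int) :
    ∀ (l : List Int) (cs : List Char) (j : Nat), j < cs.length → (j : Int) < L →
      (l.foldl (fun cs p => if 0 ≤ p ∧ p < L then cs.set p.toNat 'Z' else cs) cs)[j]?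
        = if (j : Int) ∈ l then some 'Z' else cs[j]? := by
  intro l
  induction l with
  | nil => intro cs j _ _; simp
  | cons p l ih =>
    intro cs j hj hjL
    simp only [List.foldl_cons]
    have hlen : j < (if 0 ≤ p ∧ p < L then cs.set p.toNat 'Z' else cs).length := by
      split <;> simp [hj]
    rw [ih _ j hlen hjL]
    by_cases hl : (j : Int) ∈ l
    · simp [hl]
    · by_cases hp : p = (j : Int)
      · subst hp
        have hg : (0 : Int) ≤ (j : Int) ∧ (j : Int) < L := ⟨by omega, hjL⟩
        rw [if_pos hg]
        simp [hl, hj, Int.toNat_natCast]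
      · have hne : ¬ ((j : Int) = p) := fun h => hp h.symm
        simp only [List.mem_cons, hl, or_false, hne, if_false]
        by_cases hg : 0 ≤ p ∧ p < L
        · rw [if_pos hg, List.getElem?_set]
          have hpt : ¬ (p.toNat = j) := by omega
          simp [hpt]
        · rw [if_neg hg]

-- ===== VERDICT =====
theorem sparse_sigmaz_string_spec : Claim_equal_sparse_sigmaz_string := by
  intro length pos _
  unfold Spec_sparse_sigmaz_string sparse_sigmaz_string sparse_sigmaz_string_alt
  rw [PySem.List.pyRange_one, List.foldl_map,
    foldA (fun k : Nat => ((0 : Int) + (k : Int)) ∈ pos) (List.range (length - 0).toNat) ""]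
  simp only [Int.sub_zero, zero_add]
  have hempty : ∀ t : String, ("" : String) ++ t = t := by intro t; simp
  rw [hempty]
  congr 1
  apply List.ext_getElem?
  intro j
  by_cases hj : j < length.toNat
  · have hjL : (j : Int) < length := by omega
    rw [foldB_getElem? length pos (List.replicate length.toNat 'I') j (by simpa using hj) hjL]
    rw [List.getElem?_map, List.getElem?_range hj]
    split <;> rename_i h <;> simp [h, hj]
  · have h1 : ((List.range length.toNat).map
        (fun k : Nat => if ((k : Int)) ∈ pos then 'Z' else 'I'))[j]? = none := by
      apply List.getElem?_eq_none
      simpa using Nat.le_of_not_lt hj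
    have h2 : (pos.foldl
        (fun cs p => if 0 ≤ p ∧ p < length then cs.set p.toNat 'Z' else cs)
        (List.replicate length.toNat 'I'))[j]? = none := by
      apply List.getElem?_eq_none
      rw [foldB_length]
      simpa using Nat.le_of_not_lt hj
    rw [h1, h2]
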